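-- pv_equiv track=rewrite | github.com/BenBiehl/CS3500-Homework-5 | puckparser2debug.py | isString
-- ===== SOURCE A (Python) =====
-- def isString(word):
--     state = 1
--     i = 0
--     acc = False
--
--     while i < len(word):
--         c = word[i]
--         if state == 1:
--             if c == '\"':
--                 state = 2
--                 i += 1
--             else:
--                 return False
--         elif state == 2:
--             if c != ' ' and c != '\"':
--                 state = 3
--                 i += 1
--             else:
--                 return False
--         elif state == 3:
--             if c != ' ' and c != '\"':
--                 state = 3
--                 i += 1
--             elif c == '\"':
--                 state = 4
--                 i += 1
--                 acc = True
--             else: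
--                 return False
--         # If there's a closing parenthesis, then if there are any more characters afterward it's invalid
--         elif state == 4:
--             return False
--     return acc
-- ===== SOURCE B (Python) =====
-- def isString(word):
--     return (len(word) >= 3
--             and word[0] == '"'
--             and word[-1] == '"'
--             and all(c != ' ' and c != '"' for c in word[1:-1]))
-- ===== Notes on version B (the rewrite author's own statement) =====
-- stated objective: simpler
-- what changed: Replaced the stateful DFA while-loop with a direct structural predicate: length >= 3, first and last characters are quotes, and every interior character is neither a space nor a quote.
import Mathlib
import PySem

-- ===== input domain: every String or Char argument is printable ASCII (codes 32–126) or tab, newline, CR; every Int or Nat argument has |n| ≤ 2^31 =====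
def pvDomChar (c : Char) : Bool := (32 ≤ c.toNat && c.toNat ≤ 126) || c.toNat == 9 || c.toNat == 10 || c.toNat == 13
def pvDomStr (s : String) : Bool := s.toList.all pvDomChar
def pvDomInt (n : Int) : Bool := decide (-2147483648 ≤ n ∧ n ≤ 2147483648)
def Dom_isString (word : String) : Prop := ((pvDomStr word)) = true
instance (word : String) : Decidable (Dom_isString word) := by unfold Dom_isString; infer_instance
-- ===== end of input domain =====

-- B replaces A's stateful DFA while-loop by a direct structural predicate (same O(n) cost, simpler).

-- ===== PORT A =====
-- A's while-loop over the characters, carrying (state, acc) exactly as the Python does.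
def isStringLoop (state : Int) (acc : Bool) : List Char → Bool
  | [] => acc
  | c :: rest =>
    if state == 1 then
      if c == '"' then isStringLoop 2 acc rest else false
    else if state == 2 then
      if c != ' ' && c != '"' then isStringLoop 3 acc rest else false
    else if state == 3 then
      if c != ' ' && c != '"' then isStringLoop 3 acc rest
      else if c == '"' then isStringLoop 4 true rest
      else false
    else if state == 4 then false
    else isStringLoop state acc rest  -- unreachable in the Python (state is always 1..4)

def isString (word : String) : Bool := isStringLoop 1 false word.toList

-- ===== PORT B =====
-- Source B: length guard first (short-circuit, as in Python), then word[0], word[-1] via pyGet?, interior word[1:-1] via slice.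
def isString_alt (word : String) : Bool :=
  let cs := word.toList
  decide (3 ≤ cs.length)
    && (PySem.List.pyGet? cs 0 == some '"')
    && (PySem.List.pyGet? cs (-1) == some '"')
    && (PySem.List.slice cs (some 1) (some (-1))).all (fun c => c != ' ' && c != '"')

-- ===== PRECONDITION & SPEC =====
def Spec_isString (word : String) (out : Bool) : Prop := out = isString_alt word
instance (word : String) (out : Bool) : Decidable (Spec_isString word out) := by unfold Spec_isString; infer_instance

-- ===== CLAIM (what is proved, stated in full; the proofs are below) =====
def Claim_equal_isString : Prop := ∀ (word : String), Dom_isString word → Spec_isString word (isString word)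

-- ===== LEMMAS AND PROOFS =====

-- single-step unfoldings of A's loop (kept as rewrite rules so simp does not over-unfold)
lemma loop1_quote (acc : Bool) (l : List Char) : isStringLoop 1 acc ('"' :: l) = isStringLoop 2 acc l := by
  simp [isStringLoop]

lemma loop1_other {c : Char} (h : c ≠ '"') (acc : Bool) (l : List Char) :
    isStringLoop 1 acc (c :: l) = false := by
  simp [isStringLoop, h]

lemma loop2_good {c : Char} (h1 : c ≠ ' ') (h2 : c ≠ '"') (acc : Bool) (l : List Char) :
    isStringLoop 2 acc (c :: l) = isStringLoop 3 acc l := by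
  simp [isStringLoop, h1, h2]

lemma loop3_good {c : Char} (h1 : c ≠ ' ') (h2 : c ≠ '"') (l : List Char) :
    isStringLoop 3 false (c :: l) = isStringLoop 3 false l := by
  simp [isStringLoop, h1, h2]

lemma loop3_quote (l : List Char) : isStringLoop 3 false ('"' :: l) = isStringLoop 4 true l := by
  simp [isStringLoop]

lemma loop3_space (l : List Char) : isStringLoop 3 false (' ' :: l) = false := by
  simp [isStringLoop]

lemma loop4_true (l : List Char) : isStringLoop 4 true l = l.isEmpty := by
  cases l <;> simp [isStringLoop]

-- characterisation of A's state-3 loop (acc = false): accepts iff the list ends with '"'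
-- and every character before that is neither a space nor a quote.
lemma isStringLoop_three (l : List Char) :
    isStringLoop 3 false l
      = ((l.getLast? == some '"') && l.dropLast.all (fun c => c != ' ' && c != '"')) := by
  induction l with
  | nil => simp [isStringLoop]
  | cons c rest ih =>
    by_cases hq : c = '"'
    · subst hq
      rw [loop3_quote, loop4_true]
      cases rest <;> simp
    · by_cases hsp : c = ' '
      · subst hsp
        rw [loop3_space]
        cases rest <;> simp
      · rw [loop3_good hsp hq, ih]
        cases rest with
        | nil => simp [hq]
        | cons d r => simp [hsp, hq, Bool.and_left_comm]

-- Source B's interior slice word[1:-1] on a cons cell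
lemma slice_one_neg_one (a : Char) (l : List Char) :
    PySem.List.slice (a :: l) (some 1) (some (-1)) = l.dropLast := by
  have h : ¬((l.length : Int) < 0) := by omega
  simp [PySem.List.slice, PySem.List.clampIdx, h, List.dropLast_eq_take]

theorem isString_spec_aux (word : String) : isString word = isString_alt word := by
  unfold isString isString_alt
  match word.toList with
  | [] => simp [isStringLoop]
  | [a] =>
    by_cases ha : a = '"' <;>
      simp [isStringLoop, ha]
  | [a, b] =>
    by_cases ha : a = '"' <;> by_cases hb1 : b = ' ' <;> by_cases hb2 : b = '"' <;>
      simp [isStringLoop, ha, hb1, hb2]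
  | a :: b :: c :: rest =>
    by_cases ha : a = '"'
    · subst ha
      rw [loop1_quote]
      by_cases hb1 : b = ' '
      · subst hb1
        simp [isStringLoop, slice_one_neg_one, PySem.List.pyGet?_zero_cons,
          PySem.List.pyGet?_neg_one]
      · by_cases hb2 : b = '"'
        · subst hb2
          simp [isStringLoop, slice_one_neg_one, PySem.List.pyGet?_zero_cons,
            PySem.List.pyGet?_neg_one]
        · rw [loop2_good hb1 hb2, isStringLoop_three]
          simp [slice_one_neg_one, PySem.List.pyGet?_zero_cons, PySem.List.pyGet?_neg_one,
            hb1, hb2, Bool.and_left_comm]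
    · rw [loop1_other ha]
      simp [PySem.List.pyGet?_zero_cons, ha]

-- ===== VERDICT (by name: the statement is the Claim_ definition above) =====
theorem isString_spec : Claim_equal_isString := by
  intro word _
  exact isString_spec_aux word
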